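-- pv_equiv track=rewrite | github.com/sealinglip/leecode | 2712.使所有字符相等的最小成本.py | minimumCost
-- ===== SOURCE A (Python) =====
-- from math import inf
--
-- def minimumCost(s: str) -> int:
--     n = len(s)
--     prefix = [0] * n
--     suffix = [0] * n
--
--     for i in range(1, n):
--         prefix[i] = prefix[i-1] + (0 if s[i] == s[i-1] else i)
--
--     for i in range(n-2, -1, -1):
--         suffix[i] = suffix[i+1] + (0 if s[i] == s[i+1] else n-i-1)
--
--     res = inf
--     for i in range(n):
--         res = min(res, prefix[i] + suffix[i])
--     return res
-- ===== SOURCE B (Python) =====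
-- def minimumCost(s: str) -> int:
--     n = len(s)
--     res = 0
--     for i, (x, y) in enumerate(zip(s, s[1:]), 1):
--         if x != y:
--             res += min(i, n - i)
--     return res
-- ===== Notes on version B (the rewrite author's own statement) =====
-- stated objective: simpler
-- what changed: Replaces the prefix/suffix cost arrays and the final min-over-split-points scan with a single pass that adds min(i, n-i) for every adjacent unequal pair (no arrays, O(1) extra space); Pre_ excludes the empty string, on which A returns math.inf, a float instead of an int.
-- outside the precondition, e.g. on minimumCost(''): A returns inf, B returns 0
import Mathlib
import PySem

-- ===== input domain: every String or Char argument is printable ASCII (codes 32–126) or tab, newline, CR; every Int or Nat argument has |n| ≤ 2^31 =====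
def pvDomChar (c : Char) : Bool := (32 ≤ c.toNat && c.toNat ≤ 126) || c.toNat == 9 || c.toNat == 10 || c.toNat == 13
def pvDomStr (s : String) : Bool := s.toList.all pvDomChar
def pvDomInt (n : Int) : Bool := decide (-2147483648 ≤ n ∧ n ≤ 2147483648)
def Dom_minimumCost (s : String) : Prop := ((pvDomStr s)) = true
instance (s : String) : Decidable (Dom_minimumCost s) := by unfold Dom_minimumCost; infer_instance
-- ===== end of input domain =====

-- B replaces A's prefix/suffix cost arrays and final min-over-split-points scan with one
-- pass adding min(i, n-i) per adjacent unequal pair (simpler, O(1) extra space).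

-- ===== PORT A =====
-- prefix array loop: for i in range(1, n): prefix[i] = prefix[i-1] + (0 if s[i] == s[i-1] else i)
def pvPreArr (c : List Char) : List Int :=
  (PySem.List.pyRange 1 (c.length : Int) 1).foldl
    (fun p i => p.set i.toNat (PySem.List.pyGetD p (i - 1) 0 +
      (if PySem.List.pyGetD c i ' ' = PySem.List.pyGetD c (i - 1) ' ' then 0 else i)))
    (List.replicate c.length 0)

-- suffix array loop: for i in range(n-2, -1, -1): suffix[i] = suffix[i+1] + (0 if s[i] == s[i+1] else n-i-1)
def pvSufArr (c : List Char) : List Int :=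
  (PySem.List.pyRange ((c.length : Int) - 2) (-1) (-1)).foldl
    (fun q i => q.set i.toNat (PySem.List.pyGetD q (i + 1) 0 +
      (if PySem.List.pyGetD c i ' ' = PySem.List.pyGetD c (i + 1) ' ' then 0 else (c.length : Int) - i - 1)))
    (List.replicate c.length 0)

-- res loop: res = inf; for i in range(n): res = min(res, prefix[i] + suffix[i])
-- 'none' stands for the initial math.inf (min(inf, x) = x).
def pvResFold (pre suf : List Int) (n : Int) : Option Int :=
  (PySem.List.pyRange 0 n 1).foldl
    (fun r i => match r with
      | none => some (PySem.List.pyGetD pre i 0 + PySem.List.pyGetD suf i 0)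
      | some v => some (min v (PySem.List.pyGetD pre i 0 + PySem.List.pyGetD suf i 0)))
    none

def minimumCost (s : String) : Int :=
  match pvResFold (pvPreArr s.toList) (pvSufArr s.toList) (s.toList.length : Int) with
  | some v => v
  | none => 0   -- only for s = "", where Python A returns math.inf (excluded by Pre_)

-- ===== PORT B =====
-- for i, (x, y) in enumerate(zip(s, s[1:]), 1): if x != y: res += min(i, n - i)
def pvAltGo (n : Int) : Int → List Char → Int
  | _, [] => 0
  | _, [_] => 0
  | i, x :: y :: rest => (if x ≠ y then min i (n - i) else 0) + pvAltGo n (i + 1) (y :: rest)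

def minimumCost_alt (s : String) : Int :=
  pvAltGo (s.toList.length : Int) 1 s.toList

-- ===== PRECONDITION & SPEC =====
-- Pre_ excludes only the empty string, on which A returns math.inf — a float, not an int of
-- the declared return type.
def Pre_minimumCost (s : String) : Prop := s ≠ ""
instance (s : String) : Decidable (Pre_minimumCost s) := by unfold Pre_minimumCost; infer_instance
def pvWitness_minimumCost : String := "aba"

def Spec_minimumCost (s : String) (out : Int) : Prop := out = minimumCost_alt s
instance (s : String) (out : Int) : Decidable (Spec_minimumCost s out) := by unfold Spec_minimumCost; infer_instance

-- ===== CLAIM (what is proved, stated in full; the proofs are below) =====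
def Claim_equal_minimumCost : Prop := ∀ (s : String), Dom_minimumCost s → Pre_minimumCost s → Spec_minimumCost s (minimumCost s)

-- ===== LEMMAS AND PROOFS =====

-- per-boundary costs: pcost k = what prefix charges boundary k, scost k = what suffix charges,
-- gcost k = what B charges (the cheaper side).
def pvPcost (c : List Char) (k : ℕ) : Int :=
  if PySem.List.pyGetD c (k : Int) ' ' = PySem.List.pyGetD c ((k : Int) - 1) ' ' then 0 else (k : Int)
def pvScost (c : List Char) (k : ℕ) : Int :=
  if PySem.List.pyGetD c (k : Int) ' ' = PySem.List.pyGetD c ((k : Int) - 1) ' ' then 0 else (c.length : Int) - (k : Int)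
def pvGcost (c : List Char) (k : ℕ) : Int :=
  if PySem.List.pyGetD c (k : Int) ' ' = PySem.List.pyGetD c ((k : Int) - 1) ' ' then 0
  else min (k : Int) ((c.length : Int) - (k : Int))

def pvPsum (c : List Char) (k : ℕ) : Int := ∑ t ∈ Finset.Ico 1 (k + 1), pvPcost c t
def pvSsum (c : List Char) (k : ℕ) : Int := ∑ t ∈ Finset.Ico (k + 1) c.length, pvScost c t
def pvF (c : List Char) (k : ℕ) : Int := pvPsum c k + pvSsum c k
def pvG (c : List Char) : Int := ∑ t ∈ Finset.Ico 1 c.length, pvGcost c t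

lemma pvSumIco_bot {a b : ℕ} (h : a < b) (f : ℕ → ℤ) :
    ∑ k ∈ Finset.Ico a b, f k = f a + ∑ k ∈ Finset.Ico (a + 1) b, f k := by
  rw [← Finset.insert_Ico_add_one_left_eq_Ico h, Finset.sum_insert (by simp)]

-- the prefix loop computes pvPsum at every index
lemma pvPreArr_eq (c : List Char) :
    pvPreArr c = (List.range c.length).map (pvPsum c) := by
  suffices H : ∀ m : ℕ, m ≤ c.length →
      (PySem.List.pyRange 1 (m : Int) 1).foldl
        (fun p i => p.set i.toNat (PySem.List.pyGetD p (i - 1) 0 +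
          (if PySem.List.pyGetD c i ' ' = PySem.List.pyGetD c (i - 1) ' ' then 0 else i)))
        (List.replicate c.length 0)
      = (List.range c.length).map (fun k => if k < m then pvPsum c k else 0) by
    unfold pvPreArr
    rw [H c.length le_rfl]
    apply List.map_congr_left
    intro k hk
    simp [List.mem_range.mp hk]
  intro m
  induction m with
  | zero =>
    intro _
    rw [PySem.List.pyRange_one_eq_nil (by norm_num)]
    apply List.ext_getElem (by simp)
    intro k h1 h2
    simp
  | succ m ih =>
    intro hm1
    by_cases hm0 : m = 0
    · subst hm0
      rw [PySem.List.pyRange_one_eq_nil (by norm_num)]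
      apply List.ext_getElem (by simp)
      intro k h1 h2
      simp only [List.getElem_map, List.getElem_range]
      by_cases hk : k < 1
      · have : k = 0 := by omega
        subst this
        simp [pvPsum]
      · simp [hk]
    · have hm : 1 ≤ m := by omega
      rw [show ((m + 1 : ℕ) : Int) = (m : Int) + 1 by push_cast; ring,
        PySem.List.pyRange_one_succ_right (by exact_mod_cast hm), List.foldl_append,
        ih (by omega)]
      simp only [List.foldl_cons, List.foldl_nil]
      have hidx : ((m : Int)).toNat = m := Int.toNat_natCast m
      have hm1' : (m : Int) - 1 = ((m - 1 : ℕ) : Int) := by push_cast [hm]; ring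
      have hgd : PySem.List.pyGetD
          ((List.range c.length).map (fun k => if k < m then pvPsum c k else 0)) ((m : Int) - 1) 0
          = pvPsum c (m - 1) := by
        rw [hm1', PySem.List.pyGetD_natCast, PySem.List.getD_map_range _ _ _ _ (by omega)]
        simp [show m - 1 < m by omega]
      rw [hidx, hgd]
      have hval : pvPsum c (m - 1) +
          (if PySem.List.pyGetD c (m : Int) ' ' = PySem.List.pyGetD c ((m : Int) - 1) ' ' then 0 else (m : Int))
          = pvPsum c m := by
        unfold pvPsum pvPcost
        rw [show m - 1 + 1 = m from by omega]
        exact (Finset.sum_Ico_succ_top (by omega) _).symm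
      rw [hval]
      apply List.ext_getElem (by simp)
      intro k h1 h2
      simp only [List.getElem_set, List.getElem_map, List.getElem_range] at h1 ⊢
      by_cases hkm : m = k
      · subst hkm
        simp [show m < m + 1 by omega]
      · simp only [hkm, if_false]
        by_cases hk : k < m
        · simp [hk, show k < m + 1 by omega]
        · simp [hk, show ¬ k < m + 1 by omega]

-- the suffix loop computes pvSsum at every index
lemma pvSufArr_eq (c : List Char) :
    pvSufArr c = (List.range c.length).map (pvSsum c) := by
  have H : ∀ m : ℕ, m + 1 ≤ c.length →
      (PySem.List.pyRange ((m : Int) - 1) (-1) (-1)).foldl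
        (fun q i => q.set i.toNat (PySem.List.pyGetD q (i + 1) 0 +
          (if PySem.List.pyGetD c i ' ' = PySem.List.pyGetD c (i + 1) ' ' then 0 else (c.length : Int) - i - 1)))
        ((List.range c.length).map (fun k => if m ≤ k then pvSsum c k else 0))
      = (List.range c.length).map (pvSsum c) := by
    intro m
    induction m with
    | zero =>
      intro _
      rw [PySem.List.pyRange_neg_one_eq_nil (by norm_num)]
      simp
    | succ m ih =>
      intro hm1
      rw [show ((m + 1 : ℕ) : Int) - 1 = (m : Int) by push_cast; ring,
        PySem.List.pyRange_neg_one_cons (by omega), List.foldl_cons]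
      have hstep :
          ((List.range c.length).map (fun k => if m + 1 ≤ k then pvSsum c k else 0)).set
            ((m : Int)).toNat
            (PySem.List.pyGetD ((List.range c.length).map (fun k => if m + 1 ≤ k then pvSsum c k else 0)) ((m : Int) + 1) 0 +
              (if PySem.List.pyGetD c (m : Int) ' ' = PySem.List.pyGetD c ((m : Int) + 1) ' ' then 0
               else (c.length : Int) - (m : Int) - 1))
          = (List.range c.length).map (fun k => if m ≤ k then pvSsum c k else 0) := by
        have hidx : ((m : Int)).toNat = m := Int.toNat_natCast m
        have hgd : PySem.List.pyGetD
            ((List.range c.length).map (fun k => if m + 1 ≤ k then pvSsum c k else 0)) ((m : Int) + 1) 0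
            = pvSsum c (m + 1) := by
          rw [show (m : Int) + 1 = ((m + 1 : ℕ) : Int) by push_cast; ring,
            PySem.List.pyGetD_natCast, PySem.List.getD_map_range _ _ _ _ (by omega)]
          simp
        have hsc : pvScost c (m + 1) =
            (if PySem.List.pyGetD c (m : Int) ' ' = PySem.List.pyGetD c ((m : Int) + 1) ' ' then 0
             else (c.length : Int) - (m : Int) - 1) := by
          unfold pvScost
          rw [show ((m + 1 : ℕ) : Int) - 1 = (m : Int) by push_cast; ring,
            show ((m + 1 : ℕ) : Int) = (m : Int) + 1 by push_cast; ring,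
            show ((c.length : Int) - ((m : Int) + 1)) = (c.length : Int) - (m : Int) - 1 by ring]
          by_cases hc : PySem.List.pyGetD c (m : Int) ' ' = PySem.List.pyGetD c ((m : Int) + 1) ' '
          · rw [if_pos hc, if_pos hc.symm]
          · rw [if_neg hc, if_neg (fun h => hc h.symm)]
        have hval : pvSsum c (m + 1) +
            (if PySem.List.pyGetD c (m : Int) ' ' = PySem.List.pyGetD c ((m : Int) + 1) ' ' then 0
             else (c.length : Int) - (m : Int) - 1)
            = pvSsum c m := by
          rw [← hsc]
          unfold pvSsum
          conv_rhs => rw [pvSumIco_bot (show m + 1 < c.length from by omega) (pvScost c)]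
          exact add_comm _ _
        rw [hidx, hgd, hval]
        apply List.ext_getElem (by simp)
        intro k h1 h2
        simp only [List.getElem_set, List.getElem_map, List.getElem_range] at h1 ⊢
        by_cases hkm : m = k
        · subst hkm
          simp
        · simp only [hkm, if_false]
          by_cases hk : m + 1 ≤ k
          · simp [hk, show m ≤ k by omega]
          · simp [hk, show ¬ m ≤ k by omega]
      rw [hstep, ih (by omega)]
  unfold pvSufArr
  rcases Nat.eq_zero_or_pos c.length with h0 | hpos
  · rw [h0]
    rw [PySem.List.pyRange_neg_one_eq_nil (by norm_num)]
    simp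
  · have hinit : (List.replicate c.length (0 : Int))
        = (List.range c.length).map (fun k => if c.length - 1 ≤ k then pvSsum c k else 0) := by
      apply List.ext_getElem (by simp)
      intro k h1 h2
      simp only [List.getElem_replicate, List.getElem_map, List.getElem_range] at h1 ⊢
      by_cases hk : c.length - 1 ≤ k
      · have : pvSsum c k = 0 := by
          unfold pvSsum
          rw [Finset.Ico_eq_empty (by simp at h1; omega)]
          simp
        simp [hk, this]
      · simp [hk]
    rw [show (c.length : Int) - 2 = ((c.length - 1 : ℕ) : Int) - 1 by push_cast [hpos]; ring,
      hinit, H (c.length - 1) (by omega)]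

-- the res loop computes a minimum: some value attained at some index and ≤ all of them
lemma pvResFold_spec (pre suf : List Int) (n : ℕ) (hn : 1 ≤ n) :
    ∃ v, pvResFold pre suf (n : Int) = some v ∧
      (∃ i < n, v = PySem.List.pyGetD pre (i : Int) 0 + PySem.List.pyGetD suf (i : Int) 0) ∧
      (∀ i < n, v ≤ PySem.List.pyGetD pre (i : Int) 0 + PySem.List.pyGetD suf (i : Int) 0) := by
  induction n, hn using Nat.le_induction with
  | base =>
    refine ⟨PySem.List.pyGetD pre 0 0 + PySem.List.pyGetD suf 0 0, ?_, ⟨0, by omega, by norm_num⟩, ?_⟩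
    · unfold pvResFold
      rw [show ((1 : ℕ) : Int) = 0 + 1 by norm_num,
        PySem.List.pyRange_one_succ_right le_rfl, PySem.List.pyRange_one_eq_nil le_rfl]
      rfl
    · intro i hi
      interval_cases i
      norm_num
  | succ m hm ih =>
    obtain ⟨v, hv, ⟨i₀, hi₀, hval⟩, hle⟩ := ih
    have hsplit : pvResFold pre suf ((m + 1 : ℕ) : Int)
        = some (min v (PySem.List.pyGetD pre (m : Int) 0 + PySem.List.pyGetD suf (m : Int) 0)) := by
      unfold pvResFold at hv ⊢
      rw [show ((m + 1 : ℕ) : Int) = (m : Int) + 1 by push_cast; ring,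
        PySem.List.pyRange_one_succ_right (by positivity), List.foldl_append, hv]
      rfl
    refine ⟨_, hsplit, ?_, ?_⟩
    · rcases le_total v (PySem.List.pyGetD pre (m : Int) 0 + PySem.List.pyGetD suf (m : Int) 0) with h | h
      · exact ⟨i₀, by omega, by rw [min_eq_left h]; exact hval⟩
      · exact ⟨m, by omega, by rw [min_eq_right h]⟩
    · intro i hi
      rcases Nat.lt_or_ge i m with h | h
      · exact le_trans (min_le_left _ _) (hle i h)
      · have : i = m := by omega
        subst this
        exact min_le_right _ _

-- B's pass computes pvG
lemma pvAltGo_eq (c : List Char) :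
    ∀ (t : List Char) (j : ℕ), c.drop j = t →
      pvAltGo (c.length : Int) ((j : Int) + 1) t = ∑ k ∈ Finset.Ico (j + 1) c.length, pvGcost c k := by
  intro t
  induction t with
  | nil =>
    intro j hj
    have : c.length ≤ j := List.drop_eq_nil_iff.mp hj
    rw [Finset.Ico_eq_empty (by omega)]
    simp [pvAltGo]
  | cons x t ih =>
    cases t with
    | nil =>
      intro j hj
      have hlen : c.length - j = 1 := by
        have := congrArg List.length hj; simpa using this
      have hjlt : j < c.length := by omega
      rw [Finset.Ico_eq_empty (by omega)]
      simp [pvAltGo]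
    | cons y r =>
      intro j hj
      have hlen : c.length - j = r.length + 2 := by
        have := congrArg List.length hj; simpa using this
      have hx : getElem? c j = some x := by
        have h0 : getElem? (c.drop j) 0 = some x := by rw [hj]; rfl
        rw [List.getElem?_drop] at h0; simpa using h0
      have hy : getElem? c (j+1) = some y := by
        have h0 : getElem? (c.drop j) 1 = some y := by rw [hj]; rfl
        rw [List.getElem?_drop] at h0; simpa using h0
      have hdrop : c.drop (j + 1) = y :: r := by
        have h1 : (c.drop j).drop 1 = y :: r := by rw [hj]; rfl
        rw [List.drop_drop] at h1
        exact h1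
      have ihj := ih (j + 1) hdrop
      have hxc : PySem.List.pyGetD c ((j : Int) + 1) ' ' = y := by
        rw [show ((j : Int) + 1) = ((j + 1 : ℕ) : Int) by push_cast; ring,
          PySem.List.pyGetD_natCast, List.getD, hy]; rfl
      have hyc : PySem.List.pyGetD c (j : Int) ' ' = x := by
        rw [PySem.List.pyGetD_natCast, List.getD, hx]; rfl
      have hsum : ∑ k ∈ Finset.Ico (j + 1) c.length, pvGcost c k
          = pvGcost c (j + 1) + ∑ k ∈ Finset.Ico (j + 2) c.length, pvGcost c k := by
        have := pvSumIco_bot (a := j + 1) (b := c.length) (by omega) (pvGcost c)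
        simpa using this
      rw [hsum]
      show (if x ≠ y then min ((j : Int) + 1) ((c.length : Int) - ((j : Int) + 1)) else 0)
          + pvAltGo (c.length : Int) ((j : Int) + 1 + 1) (y :: r) = _
      have h2 : pvAltGo (c.length : Int) ((j : Int) + 1 + 1) (y :: r)
          = ∑ k ∈ Finset.Ico (j + 1 + 1) c.length, pvGcost c k := by
        have := ihj
        rw [show (((j + 1 : ℕ)) : Int) + 1 = (j : Int) + 1 + 1 by push_cast; ring] at this
        exact this
      rw [h2]
      have hg : pvGcost c (j + 1)
          = (if x ≠ y then min ((j : Int) + 1) ((c.length : Int) - ((j : Int) + 1)) else 0) := by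
        unfold pvGcost
        rw [show (((j + 1 : ℕ) : Int) - 1) = (j : Int) by push_cast; ring]
        rw [show ((j + 1 : ℕ) : Int) = (j : Int) + 1 by push_cast; ring]
        rw [hxc, hyc]
        by_cases hxy : x = y <;> simp [hxy, eq_comm]
      rw [hg]

-- pointwise: every split point costs at least B's sum
lemma pvG_le_F (c : List Char) (i : ℕ) (hi : i < c.length) : pvG c ≤ pvF c i := by
  unfold pvG pvF pvPsum pvSsum
  rw [← Finset.sum_Ico_consecutive (pvGcost c) (m := 1) (n := i + 1) (k := c.length)
    (by omega) (by omega)]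
  apply add_le_add
  · apply Finset.sum_le_sum
    intro k _
    unfold pvGcost pvPcost
    by_cases h : PySem.List.pyGetD c (k : Int) ' ' = PySem.List.pyGetD c ((k : Int) - 1) ' '
    · simp [h]
    · simp only [h, if_false]; exact min_le_left _ _
  · apply Finset.sum_le_sum
    intro k _
    unfold pvGcost pvScost
    by_cases h : PySem.List.pyGetD c (k : Int) ' ' = PySem.List.pyGetD c ((k : Int) - 1) ' '
    · simp [h]
    · simp only [h, if_false]; exact min_le_right _ _

-- at the middle split point the two costs agree
lemma pvF_mid (c : List Char) (h : 1 ≤ c.length) : pvF c (c.length / 2) = pvG c := by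
  unfold pvG pvF pvPsum pvSsum
  rw [← Finset.sum_Ico_consecutive (pvGcost c) (m := 1) (n := c.length / 2 + 1) (k := c.length)
    (by omega) (by omega)]
  congr 1
  · apply Finset.sum_congr rfl
    intro k hk
    have hk2 : 2 * k ≤ c.length := by
      have := (Finset.mem_Ico.mp hk).2
      have hle : k ≤ c.length / 2 := by omega
      omega
    unfold pvPcost pvGcost
    by_cases hc : PySem.List.pyGetD c (k : Int) ' ' = PySem.List.pyGetD c ((k : Int) - 1) ' '
    · simp [hc]
    · simp only [hc, if_false]
      have : (k : Int) ≤ (c.length : Int) - (k : Int) := by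
        have : ((2 * k : ℕ) : Int) ≤ ((c.length : ℕ) : Int) := by exact_mod_cast hk2
        push_cast at this; omega
      omega
  · apply Finset.sum_congr rfl
    intro k hk
    have hk2 : c.length < 2 * k := by
      have := (Finset.mem_Ico.mp hk).1
      omega
    unfold pvScost pvGcost
    by_cases hc : PySem.List.pyGetD c (k : Int) ' ' = PySem.List.pyGetD c ((k : Int) - 1) ' '
    · simp [hc]
    · simp only [hc, if_false]
      have : (c.length : Int) - (k : Int) ≤ (k : Int) := by
        have : ((c.length : ℕ) : Int) < ((2 * k : ℕ) : Int) := by exact_mod_cast hk2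
        push_cast at this; omega
      omega

-- ===== VERDICT (by name: the statement is the Claim_ definition above) =====
theorem minimumCost_spec : Claim_equal_minimumCost := by
  intro s _ hpre
  unfold Spec_minimumCost minimumCost minimumCost_alt
  have hne : s.toList ≠ [] := by simpa [String.toList_eq_nil_iff] using hpre
  set c := s.toList with hc
  have hn : 1 ≤ c.length := by
    have := List.length_pos_iff.mpr hne; omega
  obtain ⟨v, hv, ⟨i₀, hi₀, hval⟩, hmin⟩ := pvResFold_spec (pvPreArr c) (pvSufArr c) c.length hn
  rw [hv]
  have hget : ∀ i < c.length,
      PySem.List.pyGetD (pvPreArr c) (i : Int) 0 + PySem.List.pyGetD (pvSufArr c) (i : Int) 0 = pvF c i := by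
    intro i hi
    rw [pvPreArr_eq, pvSufArr_eq, PySem.List.pyGetD_natCast, PySem.List.pyGetD_natCast,
      PySem.List.getD_map_range _ _ _ _ hi, PySem.List.getD_map_range _ _ _ _ hi]
    rfl
  have hmid : c.length / 2 < c.length := Nat.div_lt_self (by omega) (by omega)
  have h1 : v = pvF c i₀ := by rw [hval, hget i₀ hi₀]
  have h2 : v ≤ pvF c (c.length / 2) := by
    have := hmin _ hmid; rwa [hget _ hmid] at this
  have h3 : pvG c ≤ v := h1 ▸ pvG_le_F c i₀ hi₀
  have h4 : v = pvG c := le_antisymm (by rw [← pvF_mid c hn]; exact h2) h3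
  have h5 : pvAltGo (c.length : Int) 1 c = pvG c := by
    have := pvAltGo_eq c c 0 (by simp)
    simpa [pvG] using this
  rw [h4, h5]
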